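-- pv_equiv track=rewrite | github.com/wes719/lyricsgenerator | lyrics_to_slides_improved.py | format_lyrics
-- ===== SOURCE A (Python) =====
-- def format_lyrics(lyrics: str):
--     IGNORE_KEYWORDS = [
--         'lyrics', 'contributor', 'powered by', 'embed', 'view more',
--     ]
--     cleaned = []
--     for raw in lyrics.splitlines():
--         line = raw.strip()
--         if not line:
--             continue
--         low = line.lower()
--         if any(kw in low for kw in IGNORE_KEYWORDS):
--             continue
--         cleaned.append(line.upper())
--     return [cleaned[i:i + 2] for i in range(0, len(cleaned), 2)]
-- ===== SOURCE B (Python) =====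
-- def format_lyrics(lyrics: str):
--     IGNORE_KEYWORDS = [
--         'lyrics', 'contributor', 'powered by', 'embed', 'view more',
--     ]
--     slides = []
--     buf = []
--     for raw in lyrics.splitlines():
--         line = raw.strip()
--         if not line:
--             continue
--         low = line.lower()
--         if any(kw in low for kw in IGNORE_KEYWORDS):
--             continue
--         buf.append(line.upper())
--         if len(buf) == 2:
--             slides.append(buf)
--             buf = []
--     if buf:
--         slides.append(buf)
--     return slides
-- ===== Notes on version B (the rewrite author's own statement) =====
-- stated objective: simpler
-- what changed: Replaces A's two passes (build a cleaned list, then slice it into pairs with a ranged comprehension) by one loop that keeps a current pair buffer, emitting it whenever it holds two lines and flushing the remainder at the end.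
import Mathlib
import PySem

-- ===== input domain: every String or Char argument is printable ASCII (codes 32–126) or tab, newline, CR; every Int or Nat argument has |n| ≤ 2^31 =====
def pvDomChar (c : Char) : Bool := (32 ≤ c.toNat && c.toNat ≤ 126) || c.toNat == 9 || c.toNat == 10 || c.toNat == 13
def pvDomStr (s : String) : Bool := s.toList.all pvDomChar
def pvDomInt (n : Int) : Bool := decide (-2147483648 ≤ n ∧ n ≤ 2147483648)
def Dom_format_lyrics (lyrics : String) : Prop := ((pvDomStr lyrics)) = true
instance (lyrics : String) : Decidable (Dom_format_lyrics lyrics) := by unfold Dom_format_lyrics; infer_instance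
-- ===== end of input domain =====

-- B fuses A's two passes (clean-list build + ranged pair slicing) into one loop with a pair buffer; objective: simpler.


-- ===== PORT A =====
def pvIgnoreKeywords : List String :=
  ["lyrics", "contributor", "powered by", "embed", "view more"]

def format_lyrics (lyrics : String) : List (List String) :=
  let cleaned := (PySem.Str.splitlines lyrics).foldl
    (fun acc raw =>
      let line := PySem.Str.strip raw
      if PySem.Str.len line = 0 then acc
      else
        let low := PySem.Str.lower line
        if pvIgnoreKeywords.any (fun kw => PySem.Str.isIn kw low) then acc
        else acc ++ [PySem.Str.upper line]) []
  (PySem.List.pyRange 0 (cleaned.length : Int) 2).map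
    (fun i => PySem.List.slice cleaned (some i) (some (i + 2)))

-- ===== PORT B =====
def format_lyrics_alt (lyrics : String) : List (List String) :=
  let st := (PySem.Str.splitlines lyrics).foldl
    (fun (st : List (List String) × List String) raw =>
      let line := PySem.Str.strip raw
      if PySem.Str.len line = 0 then st
      else
        let low := PySem.Str.lower line
        if pvIgnoreKeywords.any (fun kw => PySem.Str.isIn kw low) then st
        else
          let buf := st.2 ++ [PySem.Str.upper line]
          if buf.length = 2 then (st.1 ++ [buf], ([] : List String))
          else (st.1, buf)) (([] : List (List String)), ([] : List String))
  if st.2.isEmpty then st.1 else st.1 ++ [st.2]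

-- ===== PRECONDITION & SPEC =====
def Spec_format_lyrics (lyrics : String) (out : List (List String)) : Prop := out = format_lyrics_alt lyrics
instance (lyrics : String) (out : List (List String)) : Decidable (Spec_format_lyrics lyrics out) := by unfold Spec_format_lyrics; infer_instance

-- ===== CLAIM (what is proved, stated in full; the proofs are below) =====
def Claim_equal_format_lyrics : Prop := ∀ (lyrics : String), Dom_format_lyrics lyrics → Spec_format_lyrics lyrics (format_lyrics lyrics)

-- ===== LEMMAS AND PROOFS =====

-- the shared line filter: none = skipped, some u = kept (uppercased) line
def pvKeep (raw : String) : Option String :=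
  let line := PySem.Str.strip raw
  if PySem.Str.len line = 0 then none
  else if pvIgnoreKeywords.any (fun kw => PySem.Str.isIn kw (PySem.Str.lower line)) then none
  else some (PySem.Str.upper line)

-- B's buffer step on a kept line
def pvBufStep (st : List (List String) × List String) (u : String) :
    List (List String) × List String :=
  let buf := st.2 ++ [u]
  if buf.length = 2 then (st.1 ++ [buf], ([] : List String)) else (st.1, buf)

-- grouping a list into consecutive pairs (last group may be a singleton)
def pairUp : List String → List (List String)
  | [] => []
  | [a] => [[a]]
  | a :: b :: t => [a, b] :: pairUp t

lemma stepA_eq (acc : List String) (raw : String) :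
    (let line := PySem.Str.strip raw
     if PySem.Str.len line = 0 then acc
     else
       let low := PySem.Str.lower line
       if pvIgnoreKeywords.any (fun kw => PySem.Str.isIn kw low) then acc
       else acc ++ [PySem.Str.upper line])
    = (match pvKeep raw with | none => acc | some u => acc ++ [u]) := by
  by_cases h1 : PySem.Str.len (PySem.Str.strip raw) = 0
  · simp only [pvKeep, if_pos h1]
  · by_cases h2 : pvIgnoreKeywords.any
        (fun kw => PySem.Str.isIn kw (PySem.Str.lower (PySem.Str.strip raw))) = true
    · simp only [pvKeep, if_neg h1, if_pos h2]
    · simp only [pvKeep, if_neg h1, if_neg h2]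

lemma stepB_eq (st : List (List String) × List String) (raw : String) :
    (let line := PySem.Str.strip raw
     if PySem.Str.len line = 0 then st
     else
       let low := PySem.Str.lower line
       if pvIgnoreKeywords.any (fun kw => PySem.Str.isIn kw low) then st
       else
         let buf := st.2 ++ [PySem.Str.upper line]
         if buf.length = 2 then (st.1 ++ [buf], ([] : List String)) else (st.1, buf))
    = (match pvKeep raw with | none => st | some u => pvBufStep st u) := by
  by_cases h1 : PySem.Str.len (PySem.Str.strip raw) = 0
  · simp only [pvKeep, if_pos h1]
  · by_cases h2 : pvIgnoreKeywords.any
        (fun kw => PySem.Str.isIn kw (PySem.Str.lower (PySem.Str.strip raw))) = true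
    · simp only [pvKeep, if_neg h1, if_pos h2]
    · simp only [pvKeep, if_neg h1, if_neg h2]
      rfl

lemma foldA_eq (lines : List String) (acc : List String) :
    lines.foldl (fun acc raw =>
      let line := PySem.Str.strip raw
      if PySem.Str.len line = 0 then acc
      else
        let low := PySem.Str.lower line
        if pvIgnoreKeywords.any (fun kw => PySem.Str.isIn kw low) then acc
        else acc ++ [PySem.Str.upper line]) acc
    = acc ++ lines.filterMap pvKeep := by
  induction lines generalizing acc with
  | nil => simp
  | cons raw rest ih =>
    rw [List.foldl_cons, stepA_eq, List.filterMap_cons]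
    cases h : pvKeep raw with
    | none => exact ih acc
    | some u => exact (ih (acc ++ [u])).trans (by simp)

lemma foldB_eq (lines : List String) (st : List (List String) × List String) :
    lines.foldl (fun (st : List (List String) × List String) raw =>
      let line := PySem.Str.strip raw
      if PySem.Str.len line = 0 then st
      else
        let low := PySem.Str.lower line
        if pvIgnoreKeywords.any (fun kw => PySem.Str.isIn kw low) then st
        else
          let buf := st.2 ++ [PySem.Str.upper line]
          if buf.length = 2 then (st.1 ++ [buf], ([] : List String))
          else (st.1, buf)) st
    = (lines.filterMap pvKeep).foldl pvBufStep st := by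
  induction lines generalizing st with
  | nil => simp
  | cons raw rest ih =>
    rw [List.foldl_cons, stepB_eq, List.filterMap_cons]
    cases h : pvKeep raw with
    | none => exact ih st
    | some u => exact ih (pvBufStep st u)

lemma foldB_pairUp (xs : List String) (res : List (List String)) (buf : List String)
    (hb : buf.length ≤ 1) :
    (if (xs.foldl pvBufStep (res, buf)).2.isEmpty then (xs.foldl pvBufStep (res, buf)).1
     else (xs.foldl pvBufStep (res, buf)).1 ++ [(xs.foldl pvBufStep (res, buf)).2])
    = res ++ pairUp (buf ++ xs) := by
  induction xs generalizing res buf with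
  | nil =>
    match buf, hb with
    | [], _ => simp [pairUp]
    | [a], _ => simp [pairUp]
  | cons x xs ih =>
    match buf, hb with
    | [], _ =>
      rw [List.foldl_cons]
      have h1 : pvBufStep (res, ([] : List String)) x = (res, [x]) := by simp [pvBufStep]
      rw [h1, ih res [x] (by simp)]
      rfl
    | [a], _ =>
      rw [List.foldl_cons]
      have h1 : pvBufStep (res, [a]) x = (res ++ [[a, x]], ([] : List String)) := by
        simp [pvBufStep]
      rw [h1, ih (res ++ [[a, x]]) [] (by simp)]
      simp [pairUp]

lemma chunk_range (l : List String) :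
    (List.range ((l.length + 1) / 2)).map (fun k => (l.drop (2 * k)).take 2) = pairUp l := by
  induction l using pairUp.induct with
  | case1 => simp [pairUp]
  | case2 a => simp [pairUp, List.range_succ]
  | case3 a b t ih =>
    have hlen : ((a :: b :: t).length + 1) / 2 = (t.length + 1) / 2 + 1 := by
      simp only [List.length_cons]; omega
    rw [hlen, List.range_succ_eq_map, List.map_cons, List.map_map]
    refine congrArg₂ List.cons rfl ?_
    rw [← ih]
    apply List.map_congr_left
    intro k _
    show ((a :: b :: t).drop (2 * (k + 1))).take 2 = (t.drop (2 * k)).take 2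
    have h2 : 2 * (k + 1) = 2 * k + 2 := by ring
    rw [h2]
    rfl

lemma chunkA_eq (l : List String) :
    (PySem.List.pyRange 0 (l.length : Int) 2).map
      (fun i => PySem.List.slice l (some i) (some (i + 2))) = pairUp l := by
  rw [PySem.List.pyRange_of_pos 0 (l.length : Int) (by norm_num)]
  have hn : (if (0 : Int) < (l.length : Int) then (((l.length : Int) - 0 + 2 - 1) / 2).toNat else 0)
      = (l.length + 1) / 2 := by
    split_ifs with h <;> omega
  rw [hn, List.map_map, ← chunk_range]
  apply List.map_congr_left
  intro k _
  simp only [Function.comp_apply]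
  have hs := PySem.List.slice_toNat l (a := 0 + 2 * (k : Int)) (b := 0 + 2 * (k : Int) + 2)
    (by positivity) (by positivity)
  have ha : ((0 : Int) + 2 * (k : Int)).toNat = 2 * k := by omega
  have hb : ((0 : Int) + 2 * (k : Int) + 2).toNat = 2 * k + 2 := by omega
  rw [hs, ha, hb]
  congr 1
  omega

-- ===== VERDICT (by name: the statement is the Claim_ definition above) =====
theorem format_lyrics_spec : Claim_equal_format_lyrics := by
  intro lyrics _
  unfold Spec_format_lyrics format_lyrics format_lyrics_alt
  rw [foldA_eq, foldB_eq]
  have h := foldB_pairUp ((PySem.Str.splitlines lyrics).filterMap pvKeep) [] [] (by simp)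
  simp only [List.nil_append] at h ⊢
  rw [chunkA_eq, ← h]
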